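-- pv_equiv track=rewrite | github.com/inavamsi/CCM-Project | Experiment_random_patterns.py | generate_H_comb
-- ===== SOURCE A (Python) =====
-- def generate_H_comb(max_bound,A_list,M_list):
--   H={}
--
--   for i in range(0,len(A_list)):
--     H['A'+str(A_list[i])] = {}
--     for j in range(1,max_bound):
--       if j +A_list[i]  <=max_bound:
--         H['A'+str(A_list[i])][j]=j +A_list[i]
--
--   for i in range(0,len(M_list)):
--     H['M'+str(M_list[i])] = {}
--     for j in range(1,max_bound):
--       if j*M_list[i] <=max_bound:
--         H['M'+str(M_list[i])][j]= j*M_list[i]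
--
--   for m in range(0,len(M_list)):
--     for a in range(0,len(A_list)):
--       H['M'+str(M_list[m])+'A'+str(A_list[a])] = {}
--       for j in range(1,max_bound):
--         if j*M_list[m] +A_list[a]  <=max_bound:
--           H['M'+str(M_list[m])+'A'+str(A_list[a])][j]=j*M_list[m] +A_list[a]
--
--   return H
-- ===== SOURCE B (Python) =====
-- def _entries(M, A, max_bound):
--     # pairs (j, j*M + A) for j in [1, max_bound-1] with j*M + A <= max_bound,
--     # with the j-interval computed in closed form instead of scanning all j
--     c = max_bound - A
--     lo, hi = 1, max_bound - 1
--     if M > 0: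
--         hi = min(hi, c // M)
--     elif M == 0:
--         if c < 0:
--             hi = 0
--     else:
--         lo = max(1, -(c // (-M)))
--     return {j: j * M + A for j in range(lo, hi + 1)}
--
-- def generate_H_comb(max_bound, A_list, M_list):
--     H = {}
--     for a in A_list:
--         H['A' + str(a)] = _entries(1, a, max_bound)
--     for m in M_list:
--         H['M' + str(m)] = _entries(m, 0, max_bound)
--     for m in M_list:
--         for a in A_list:
--             H['M' + str(m) + 'A' + str(a)] = _entries(m, a, max_bound)
--     return H
-- ===== Notes on version B (the rewrite author's own statement) =====
-- stated objective: faster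
-- what changed: Instead of scanning every j in range(1,max_bound) and testing the inequality, B computes the admissible j-interval [lo,hi] in closed form from floor divisions (case split on sign of M) and emits exactly the entries produced.
import Mathlib
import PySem

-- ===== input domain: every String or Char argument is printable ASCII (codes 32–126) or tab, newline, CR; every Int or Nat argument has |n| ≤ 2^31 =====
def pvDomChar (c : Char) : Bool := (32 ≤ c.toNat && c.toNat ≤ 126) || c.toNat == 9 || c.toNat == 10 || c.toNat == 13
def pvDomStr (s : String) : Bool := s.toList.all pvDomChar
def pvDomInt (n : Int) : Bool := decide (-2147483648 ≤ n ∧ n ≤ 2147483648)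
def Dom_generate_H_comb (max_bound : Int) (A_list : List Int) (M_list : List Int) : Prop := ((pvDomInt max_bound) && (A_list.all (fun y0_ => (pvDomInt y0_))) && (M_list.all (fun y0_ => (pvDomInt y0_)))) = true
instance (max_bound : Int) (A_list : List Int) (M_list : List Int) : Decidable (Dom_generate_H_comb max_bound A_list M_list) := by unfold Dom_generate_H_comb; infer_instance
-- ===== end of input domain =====

-- B replaces A's scan of every j in range(1, max_bound) by a closed-form j-interval
-- computed with floor divisions (objective: faster; mechanism: asymptotic, O(output) vs O(max_bound) per key).

-- ===== PORT A =====
def generate_H_comb (max_bound : Int) (A_list : List Int) (M_list : List Int) : List (String × List (Int × Int)) :=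
  let H0 : PySem.Dict String (PySem.Dict Int Int) := PySem.Dict.empty
  let H1 := (PySem.List.pyRange 0 (PySem.List.len A_list) 1).foldl (fun H i =>
    H.insert ("A" ++ PySem.Int.toStr (PySem.List.pyGetD A_list i 0))
      ((PySem.List.pyRange 1 max_bound 1).foldl (fun d j =>
        if j + PySem.List.pyGetD A_list i 0 ≤ max_bound then
          d.insert j (j + PySem.List.pyGetD A_list i 0) else d)
        PySem.Dict.empty)) H0
  let H2 := (PySem.List.pyRange 0 (PySem.List.len M_list) 1).foldl (fun H i =>
    H.insert ("M" ++ PySem.Int.toStr (PySem.List.pyGetD M_list i 0))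
      ((PySem.List.pyRange 1 max_bound 1).foldl (fun d j =>
        if j * PySem.List.pyGetD M_list i 0 ≤ max_bound then
          d.insert j (j * PySem.List.pyGetD M_list i 0) else d)
        PySem.Dict.empty)) H1
  let H3 := (PySem.List.pyRange 0 (PySem.List.len M_list) 1).foldl (fun H m =>
    (PySem.List.pyRange 0 (PySem.List.len A_list) 1).foldl (fun H a =>
      H.insert ("M" ++ PySem.Int.toStr (PySem.List.pyGetD M_list m 0) ++ "A" ++ PySem.Int.toStr (PySem.List.pyGetD A_list a 0))
        ((PySem.List.pyRange 1 max_bound 1).foldl (fun d j =>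
          if j * PySem.List.pyGetD M_list m 0 + PySem.List.pyGetD A_list a 0 ≤ max_bound then
            d.insert j (j * PySem.List.pyGetD M_list m 0 + PySem.List.pyGetD A_list a 0) else d)
          PySem.Dict.empty)) H) H2
  H3.items.map (fun p => (p.1, p.2.items))

-- ===== PORT B =====
-- _entries of Source B: the admissible j-interval [lo, hi] in closed form, then one comprehension
def pvEntries (M A max_bound : Int) : List (Int × Int) :=
  let c := max_bound - A
  let lo : Int := if 0 < M then 1 else if M = 0 then 1 else max 1 (-(PySem.Int.floordiv c (-M)))
  let hi : Int := if 0 < M then min (max_bound - 1) (PySem.Int.floordiv c M)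
                  else if M = 0 then (if c < 0 then 0 else max_bound - 1) else max_bound - 1
  (PySem.List.pyRange lo (hi + 1) 1).map (fun j => (j, j * M + A))

def generate_H_comb_alt (max_bound : Int) (A_list : List Int) (M_list : List Int) : List (String × List (Int × Int)) :=
  let H0 : PySem.Dict String (PySem.Dict Int Int) := PySem.Dict.empty
  let H1 := A_list.foldl (fun H a =>
    H.insert ("A" ++ PySem.Int.toStr a) (PySem.Dict.ofList (pvEntries 1 a max_bound))) H0
  let H2 := M_list.foldl (fun H m =>
    H.insert ("M" ++ PySem.Int.toStr m) (PySem.Dict.ofList (pvEntries m 0 max_bound))) H1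
  let H3 := M_list.foldl (fun H m =>
    A_list.foldl (fun H a =>
      H.insert ("M" ++ PySem.Int.toStr m ++ "A" ++ PySem.Int.toStr a)
        (PySem.Dict.ofList (pvEntries m a max_bound))) H) H2
  H3.items.map (fun p => (p.1, p.2.items))

-- ===== PRECONDITION & SPEC =====
def Spec_generate_H_comb (max_bound : Int) (A_list : List Int) (M_list : List Int) (out : List (String × List (Int × Int))) : Prop := out = generate_H_comb_alt max_bound A_list M_list
instance (max_bound : Int) (A_list : List Int) (M_list : List Int) (out : List (String × List (Int × Int))) : Decidable (Spec_generate_H_comb max_bound A_list M_list out) := by unfold Spec_generate_H_comb; infer_instance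

-- ===== CLAIM (what is proved, stated in full; the proofs are below) =====
def Claim_equal_generate_H_comb : Prop := ∀ (max_bound : Int) (A_list : List Int) (M_list : List Int), Dom_generate_H_comb max_bound A_list M_list → Spec_generate_H_comb max_bound A_list M_list (generate_H_comb max_bound A_list M_list)

-- ===== LEMMAS AND PROOFS =====

-- a fold that conditionally inserts is a fold over the filtered list
theorem pv_foldl_ite_filter {α β : Type} (q : α → Prop) [DecidablePred q] (f : β → α → β) :
    ∀ (l : List α) (init : β),
      l.foldl (fun d j => if q j then f d j else d) init
        = (l.filter (fun j => decide (q j))).foldl f init := by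
  intro l
  induction l with
  | nil => intro init; rfl
  | cons x t ih =>
    intro init
    by_cases hx : q x <;> simp [hx, ih]

-- two strictly increasing integer lists with the same members are equal
theorem pv_filter_pyRange_eq (p : Int → Bool) (a b lo hi' : Int)
    (h : ∀ j : Int, (a ≤ j ∧ j < b ∧ p j = true) ↔ (lo ≤ j ∧ j < hi')) :
    (PySem.List.pyRange a b 1).filter p = PySem.List.pyRange lo hi' 1 := by
  apply List.eq_of_perm_of_sorted (le := fun x y : Int => x < y)
  · intro x y _ _ hxy hyx; omega
  · exact (PySem.List.pairwise_lt_pyRange_one a b).filter p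
  · exact PySem.List.pairwise_lt_pyRange_one lo hi'
  · rw [List.perm_ext_iff_of_nodup ((PySem.List.nodup_pyRange_one a b).filter p)
        (PySem.List.nodup_pyRange_one lo hi')]
    intro j
    simp only [List.mem_filter, PySem.List.mem_pyRange_one]
    constructor
    · rintro ⟨⟨h1, h2⟩, h3⟩; exact (h j).mp ⟨h1, h2, h3⟩
    · intro hj; obtain ⟨h1, h2, h3⟩ := (h j).mpr hj; exact ⟨⟨h1, h2⟩, h3⟩

-- the heart: A's scan over range(1, max_bound) builds exactly B's closed-form dict
theorem pv_inner_eq (M A mb : Int) :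
    (PySem.List.pyRange 1 mb 1).foldl
        (fun d j => if j * M + A ≤ mb then d.insert j (j * M + A) else d) PySem.Dict.empty
      = PySem.Dict.ofList (pvEntries M A mb) := by
  refine (pv_foldl_ite_filter (fun j : Int => j * M + A ≤ mb)
      (fun d j => d.insert j (j * M + A)) (PySem.List.pyRange 1 mb 1) PySem.Dict.empty).trans ?_
  unfold pvEntries PySem.Dict.ofList PySem.Dict.update
  simp only [List.foldl_map]
  rw [pv_filter_pyRange_eq (fun j => decide (j * M + A ≤ mb)) 1 mb
      (if 0 < M then 1 else if M = 0 then 1 else max 1 (-(PySem.Int.floordiv (mb - A) (-M))))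
      ((if 0 < M then min (mb - 1) (PySem.Int.floordiv (mb - A) M)
        else if M = 0 then (if mb - A < 0 then 0 else mb - 1) else mb - 1) + 1)
      ?hcond]
  case hcond =>
  intro j
  simp only [decide_eq_true_eq]
  rcases lt_trichotomy M 0 with hM | hM | hM
  · have hP : (0:Int) < -M := by omega
    rw [if_neg (by omega), if_neg (by omega), if_neg (by omega), if_neg (by omega)]
    have hm : (-j) * (-M) = j * M := by ring
    have hq : (-j ≤ PySem.Int.floordiv (mb - A) (-M)) ↔ j * M ≤ mb - A := by
      rw [PySem.Int.le_floordiv_iff_mul_le hP, hm]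
    constructor
    · rintro ⟨h1, h2, h3⟩
      have h4 : -j ≤ PySem.Int.floordiv (mb - A) (-M) := hq.mpr (by linarith)
      exact ⟨by omega, by omega⟩
    · rintro ⟨h1, h2⟩
      have h4 : j * M ≤ mb - A := hq.mp (by omega)
      exact ⟨by omega, by omega, by linarith⟩
  · subst hM
    rw [if_neg (lt_irrefl 0), if_pos rfl, if_neg (lt_irrefl 0), if_pos rfl]
    by_cases hc : mb - (0:Int) < 0 + A
    · rw [if_pos (by omega)]
      simp only [mul_zero]
      omega
    · rw [if_neg (by omega)]
      simp only [mul_zero]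
      omega
  · rw [if_pos hM, if_pos hM]
    have hq : (j ≤ PySem.Int.floordiv (mb - A) M) ↔ j * M ≤ mb - A :=
      PySem.Int.le_floordiv_iff_mul_le hM
    constructor
    · rintro ⟨h1, h2, h3⟩
      have h4 : j ≤ PySem.Int.floordiv (mb - A) M := hq.mpr (by linarith)
      exact ⟨h1, by omega⟩
    · rintro ⟨h1, h2⟩
      have h4 : j * M ≤ PySem.Int.floordiv (mb - A) M * M := by
        have : j ≤ PySem.Int.floordiv (mb - A) M := by omega
        exact mul_le_mul_of_nonneg_right this (by omega)
      have h5 : j * M ≤ mb - A := hq.mp (by omega)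
      exact ⟨by omega, by omega, by linarith⟩

theorem generate_H_comb_eq_alt (mb : Int) (Al Ml : List Int) :
    generate_H_comb mb Al Ml = generate_H_comb_alt mb Al Ml := by
  have e1 : ∀ a : Int,
      (PySem.List.pyRange 1 mb 1).foldl
          (fun d j => if j + a ≤ mb then d.insert j (j + a) else d) PySem.Dict.empty
        = PySem.Dict.ofList (pvEntries 1 a mb) := by
    intro a; have h := pv_inner_eq 1 a mb; simpa only [mul_one] using h
  have e2 : ∀ m : Int,
      (PySem.List.pyRange 1 mb 1).foldl
          (fun d j => if j * m ≤ mb then d.insert j (j * m) else d) PySem.Dict.empty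
        = PySem.Dict.ofList (pvEntries m 0 mb) := by
    intro m; have h := pv_inner_eq m 0 mb; simpa only [add_zero] using h
  simp only [generate_H_comb, generate_H_comb_alt]
  refine congrArg (fun H : PySem.Dict String (PySem.Dict Int Int) =>
    H.items.map (fun p => (p.1, p.2.items))) ?_
  rw [PySem.List.foldl_pyRange_zero_pyGetD Al 0
      (fun (H : PySem.Dict String (PySem.Dict Int Int)) (a : Int) =>
        H.insert ("A" ++ PySem.Int.toStr a)
          ((PySem.List.pyRange 1 mb 1).foldl
            (fun d j => if j + a ≤ mb then d.insert j (j + a) else d) PySem.Dict.empty))]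
  rw [PySem.List.foldl_pyRange_zero_pyGetD Ml 0
      (fun (H : PySem.Dict String (PySem.Dict Int Int)) (m : Int) =>
        H.insert ("M" ++ PySem.Int.toStr m)
          ((PySem.List.pyRange 1 mb 1).foldl
            (fun d j => if j * m ≤ mb then d.insert j (j * m) else d) PySem.Dict.empty))]
  rw [PySem.List.foldl_pyRange_zero_pyGetD Ml 0
      (fun (H : PySem.Dict String (PySem.Dict Int Int)) (m : Int) =>
        (PySem.List.pyRange 0 (PySem.List.len Al) 1).foldl
          (fun H a =>
            H.insert ("M" ++ PySem.Int.toStr m ++ "A" ++ PySem.Int.toStr (PySem.List.pyGetD Al a 0))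
              ((PySem.List.pyRange 1 mb 1).foldl
                (fun d j =>
                  if j * m + PySem.List.pyGetD Al a 0 ≤ mb then
                    d.insert j (j * m + PySem.List.pyGetD Al a 0) else d)
                PySem.Dict.empty)) H)]
  have hin : ∀ H1 H2 : PySem.Dict String (PySem.Dict Int Int), H1 = H2 →
      Ml.foldl (fun H m =>
        (PySem.List.pyRange 0 (PySem.List.len Al) 1).foldl
          (fun H a =>
            H.insert ("M" ++ PySem.Int.toStr m ++ "A" ++ PySem.Int.toStr (PySem.List.pyGetD Al a 0))
              ((PySem.List.pyRange 1 mb 1).foldl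
                (fun d j =>
                  if j * m + PySem.List.pyGetD Al a 0 ≤ mb then
                    d.insert j (j * m + PySem.List.pyGetD Al a 0) else d)
                PySem.Dict.empty)) H) H1
      = Ml.foldl (fun H m =>
          Al.foldl (fun H a =>
            H.insert ("M" ++ PySem.Int.toStr m ++ "A" ++ PySem.Int.toStr a)
              (PySem.Dict.ofList (pvEntries m a mb))) H) H2 := by
    intro H1 H2 hH
    subst hH
    apply PySem.List.foldl_congr_mem
    intro acc m _
    rw [PySem.List.foldl_pyRange_zero_pyGetD Al 0
        (fun (H : PySem.Dict String (PySem.Dict Int Int)) (a : Int) =>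
          H.insert ("M" ++ PySem.Int.toStr m ++ "A" ++ PySem.Int.toStr a)
            ((PySem.List.pyRange 1 mb 1).foldl
              (fun d j => if j * m + a ≤ mb then d.insert j (j * m + a) else d)
              PySem.Dict.empty))]
    apply PySem.List.foldl_congr_mem
    intro acc2 a _
    rw [pv_inner_eq m a mb]
  apply hin
  have h1 : Al.foldl (fun (H : PySem.Dict String (PySem.Dict Int Int)) (a : Int) =>
        H.insert ("A" ++ PySem.Int.toStr a)
          ((PySem.List.pyRange 1 mb 1).foldl
            (fun d j => if j + a ≤ mb then d.insert j (j + a) else d) PySem.Dict.empty))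
        PySem.Dict.empty
      = Al.foldl (fun H a =>
          H.insert ("A" ++ PySem.Int.toStr a) (PySem.Dict.ofList (pvEntries 1 a mb)))
        PySem.Dict.empty := by
    apply PySem.List.foldl_congr_mem
    intro acc a _
    rw [e1 a]
  rw [h1]
  apply PySem.List.foldl_congr_mem
  intro acc m _
  rw [e2 m]

-- ===== VERDICT (by name: the statement is the Claim_ definition above) =====
theorem generate_H_comb_spec : Claim_equal_generate_H_comb := by
  intro mb Al Ml _
  unfold Spec_generate_H_comb
  exact generate_H_comb_eq_alt mb Al Ml
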